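-- pv_equiv track=rewrite | github.com/funmagster/Learn_Algorithms | Courses/Sirius/5 Introduction to Dynamic Programming/8.py | calk_min_time
-- ===== SOURCE A (Python) =====
-- def calk_min_time(n, times):
--     if n == 1:
--         return times[0][0]
--     dp = [
--         0, times[0][0],
--         min(times[0][1], times[0][0] + times[1][0])
--     ]
--     for i in range(3, n + 1):
--         add = min(
--             dp[i - 1] + times[i - 1][0],
--             dp[i - 2] + times[i - 2][1],
--             dp[i - 3] + times[i - 3][2]
--         )
--         dp.append(add)
--     return dp[n]
-- ===== SOURCE B (Python) =====
-- def calk_min_time(n, times):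
--     # forward/push relaxation instead of A's backward/pull DP
--     dp = [0] + [None] * n
--     for j in range(n):
--         c = dp[j] + times[j][0]
--         if dp[j + 1] is None or c < dp[j + 1]:
--             dp[j + 1] = c
--         if j + 2 <= n:
--             c = dp[j] + times[j][1]
--             if dp[j + 2] is None or c < dp[j + 2]:
--                 dp[j + 2] = c
--         if j + 3 <= n:
--             c = dp[j] + times[j][2]
--             if dp[j + 3] is None or c < dp[j + 3]:
--                 dp[j + 3] = c
--     return dp[n]
-- ===== Notes on version B (the rewrite author's own statement) =====
-- stated objective: alternative
-- what changed: Replaces A's backward/pull DP (each dp[i] computed from its three predecessors, with hand-built base cases dp[0..2] and a special n==1 branch) by a forward/push relaxation: dp[0]=0, the rest unset, and each step j pushes its three outgoing edges dp[j+1..j+3], so the base cases and the n==1 branch disappear.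
-- outside the precondition, e.g. on calk_min_time(-1, [(1, 2, 3), (4, 5, 6)]): A returns 2, B returns 0
import Mathlib
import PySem

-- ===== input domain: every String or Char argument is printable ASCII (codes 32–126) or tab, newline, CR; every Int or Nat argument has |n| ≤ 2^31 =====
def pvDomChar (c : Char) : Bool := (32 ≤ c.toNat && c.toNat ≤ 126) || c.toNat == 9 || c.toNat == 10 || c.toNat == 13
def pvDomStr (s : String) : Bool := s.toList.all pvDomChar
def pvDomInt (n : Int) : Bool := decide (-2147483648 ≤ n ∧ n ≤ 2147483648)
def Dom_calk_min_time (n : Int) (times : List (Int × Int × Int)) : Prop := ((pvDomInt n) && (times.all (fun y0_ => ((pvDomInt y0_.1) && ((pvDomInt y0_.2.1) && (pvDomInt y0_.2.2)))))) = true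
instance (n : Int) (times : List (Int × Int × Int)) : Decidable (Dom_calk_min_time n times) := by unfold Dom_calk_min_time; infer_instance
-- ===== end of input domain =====

-- B replaces A's backward/pull DP (dp[i] from its three predecessors, with explicit
-- base cases dp[0..2] and a special n==1 branch) by a forward/push relaxation with no
-- base cases beyond dp[0]=0; same O(n) cost, different pass shape.

-- ===== PORT A =====
def calk_min_time (n : Int) (times : List (Int × Int × Int)) : Int :=
  if n == 1 then (PySem.List.pyGetD times 0 (0, 0, 0)).1
  else
    let t0 := PySem.List.pyGetD times 0 (0, 0, 0)
    let t1 := PySem.List.pyGetD times 1 (0, 0, 0)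
    let dp0 : List Int := [0, t0.1, min t0.2.1 (t0.1 + t1.1)]
    let dp := (PySem.List.pyRange 3 (n + 1) 1).foldl (fun dp i =>
      dp ++ [min (min (PySem.List.pyGetD dp (i - 1) 0 + (PySem.List.pyGetD times (i - 1) (0, 0, 0)).1)
                      (PySem.List.pyGetD dp (i - 2) 0 + (PySem.List.pyGetD times (i - 2) (0, 0, 0)).2.1))
                 (PySem.List.pyGetD dp (i - 3) 0 + (PySem.List.pyGetD times (i - 3) (0, 0, 0)).2.2)]) dp0
    PySem.List.pyGetD dp n 0

-- ===== PORT B =====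
-- `if dp[k] is None or c < dp[k]: dp[k] = c` (indices in range under Pre_)
def pvRelax (dp : List (Option Int)) (k : Int) (c : Int) : List (Option Int) :=
  match PySem.List.pyGetD dp k none with
  | none => PySem.List.pySetD dp k (some c)
  | some v => if c < v then PySem.List.pySetD dp k (some c) else dp

def calk_min_time_alt (n : Int) (times : List (Int × Int × Int)) : Int :=
  let dp0 : List (Option Int) := some 0 :: List.replicate n.toNat none
  let dp := (PySem.List.pyRange 0 n 1).foldl (fun dp j =>
    let tj := PySem.List.pyGetD times j (0, 0, 0)
    let dj := (PySem.List.pyGetD dp j none).getD 0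
    let dp := pvRelax dp (j + 1) (dj + tj.1)
    let dp := if j + 2 ≤ n then pvRelax dp (j + 2) (dj + tj.2.1) else dp
    if j + 3 ≤ n then pvRelax dp (j + 3) (dj + tj.2.2) else dp) dp0
  ((PySem.List.pyGetD dp n none).getD 0)

-- ===== PRECONDITION & SPEC =====
-- Pre_ admits the natural domain: 1 ≤ n ≤ len(times) (plus n = 0 with len ≥ 2, where A also
-- returns 0). It excludes n < 0, outside the task's natural domain, where A's returned values
-- come from negative-index wraparound into leftover dp entries; everything else A raises on.
def Pre_calk_min_time (n : Int) (times : List (Int × Int × Int)) : Prop :=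
  (n = 0 ∧ 2 ≤ times.length) ∨ (1 ≤ n ∧ n ≤ times.length)
instance (n : Int) (times : List (Int × Int × Int)) : Decidable (Pre_calk_min_time n times) := by
  unfold Pre_calk_min_time; infer_instance

def pvWitness_calk_min_time : Int × (List (Int × Int × Int)) := (4, [(3, 5, 9), (2, 7, 8), (1, 4, 6), (2, 2, 2)])

def Spec_calk_min_time (n : Int) (times : List (Int × Int × Int)) (out : Int) : Prop := out = calk_min_time_alt n times
instance (n : Int) (times : List (Int × Int × Int)) (out : Int) : Decidable (Spec_calk_min_time n times out) := by unfold Spec_calk_min_time; infer_instance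

-- ===== CLAIM (what is proved, stated in full; the proofs are below) =====
def Claim_equal_calk_min_time : Prop := ∀ (n : Int) (times : List (Int × Int × Int)), Dom_calk_min_time n times → Pre_calk_min_time n times → Spec_calk_min_time n times (calk_min_time n times)

-- ===== LEMMAS AND PROOFS =====

-- the common mathematical DP both ports compute (list accesses totalised with getD,
-- exactly as both ports totalise them)
def mdp (ts : List (Int × Int × Int)) : Nat → Int
  | 0 => 0
  | 1 => (ts.getD 0 (0, 0, 0)).1
  | 2 => min (ts.getD 0 (0, 0, 0)).2.1 ((ts.getD 0 (0, 0, 0)).1 + (ts.getD 1 (0, 0, 0)).1)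
  | (k + 3) =>
      min (min (mdp ts (k + 2) + (ts.getD (k + 2) (0, 0, 0)).1)
               (mdp ts (k + 1) + (ts.getD (k + 1) (0, 0, 0)).2.1))
          (mdp ts k + (ts.getD k (0, 0, 0)).2.2)

-- edge costs out of state j (step of 1, 2, 3)
def g1 (ts : List (Int × Int × Int)) (j : Nat) : Int := mdp ts j + (ts.getD j (0, 0, 0)).1
def g2 (ts : List (Int × Int × Int)) (j : Nat) : Int := mdp ts j + (ts.getD j (0, 0, 0)).2.1
def g3 (ts : List (Int × Int × Int)) (j : Nat) : Int := mdp ts j + (ts.getD j (0, 0, 0)).2.2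

lemma mdp_two (ts : List (Int × Int × Int)) : mdp ts 2 = min (g1 ts 1) (g2 ts 0) := by
  simp [mdp, g1, g2, min_comm]
lemma mdp_three (ts : List (Int × Int × Int)) (k : Nat) :
    mdp ts (k + 3) = min (min (g1 ts (k + 2)) (g2 ts (k + 1))) (g3 ts k) := rfl

-- ---------- A-side: the pull loop builds [mdp 0, …, mdp m] ----------

lemma A_loop (ts : List (Int × Int × Int)) (k : Nat) :
    (PySem.List.pyRange 3 ((k : Int) + 3) 1).foldl (fun dp i =>
      dp ++ [min (min (PySem.List.pyGetD dp (i - 1) 0 + (PySem.List.pyGetD ts (i - 1) (0, 0, 0)).1)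
                      (PySem.List.pyGetD dp (i - 2) 0 + (PySem.List.pyGetD ts (i - 2) (0, 0, 0)).2.1))
                 (PySem.List.pyGetD dp (i - 3) 0 + (PySem.List.pyGetD ts (i - 3) (0, 0, 0)).2.2)])
      [0, (PySem.List.pyGetD ts 0 (0, 0, 0)).1,
        min (PySem.List.pyGetD ts 0 (0, 0, 0)).2.1
          ((PySem.List.pyGetD ts 0 (0, 0, 0)).1 + (PySem.List.pyGetD ts 1 (0, 0, 0)).1)]
      = (List.range (k + 3)).map (mdp ts) := by
  induction k with
  | zero =>
      rw [show ((0 : Nat) : Int) + 3 = 3 by norm_num, PySem.List.pyRange_one_eq_nil (by omega)]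
      simp [List.range_succ, List.foldl_nil, mdp,
        PySem.List.pyGetD_ofNat']
  | succ k ih =>
      have hsplit : ((k + 1 : Nat) : Int) + 3 = ((k : Int) + 3) + 1 := by push_cast; ring
      rw [hsplit, PySem.List.pyRange_one_succ_right (by omega), List.foldl_append, ih,
        List.foldl_cons, List.foldl_nil]
      have e1 : (k : Int) + 3 - 1 = ((k + 2 : Nat) : Int) := by push_cast; ring
      have e2 : (k : Int) + 3 - 2 = ((k + 1 : Nat) : Int) := by push_cast; ring
      have e3 : (k : Int) + 3 - 3 = ((k : Nat) : Int) := by ring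
      rw [e1, e2, e3, PySem.List.pyGetD_natCast, PySem.List.pyGetD_natCast,
        PySem.List.pyGetD_natCast, PySem.List.pyGetD_natCast, PySem.List.pyGetD_natCast,
        PySem.List.pyGetD_natCast,
        PySem.List.getD_map_range (mdp ts) (k + 3) (k + 2) 0 (by omega),
        PySem.List.getD_map_range (mdp ts) (k + 3) (k + 1) 0 (by omega),
        PySem.List.getD_map_range (mdp ts) (k + 3) k 0 (by omega)]
      have hr : List.map (mdp ts) (List.range (k + 1 + 3))
          = List.map (mdp ts) (List.range (k + 3)) ++ [mdp ts (k + 3)] := by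
        rw [show k + 1 + 3 = (k + 3) + 1 by omega, List.range_succ (n := k + 3), List.map_append]
        rfl
      rw [hr]
      congr 1
lemma A_eq (ts : List (Int × Int × Int)) (m : Nat) :
    calk_min_time (m : Int) ts = mdp ts m := by
  match m with
  | 1 => simp [calk_min_time, mdp, PySem.List.pyGetD_zero]
  | 0 =>
      rw [calk_min_time]
      rw [if_neg (by decide)]
      rw [show ((0 : Nat) : Int) + 1 = 1 by norm_num, PySem.List.pyRange_one_eq_nil (by omega)]
      simp [List.foldl_nil, mdp, PySem.List.pyGetD_zero]
  | (j + 2) =>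
      rw [calk_min_time]
      rw [if_neg (by simp; omega)]
      simp only []
      have h1 : ((j + 2 : Nat) : Int) + 1 = ((j : Int)) + 3 := by push_cast; ring
      rw [h1, A_loop ts j]
      rw [show ((j + 2 : Nat) : Int) = (((j + 2 : Nat) : Nat) : Int) from rfl,
        PySem.List.pyGetD_natCast,
        PySem.List.getD_map_range _ _ _ _ (by omega : j + 2 < j + 3)]

-- ---------- B-side: the push loop ----------

-- dp after the first j0 push steps: final below j0, partial just above, unset further out
def pdp (ts : List (Int × Int × Int)) (j0 k : Nat) : Option Int :=
  if k ≤ j0 then some (mdp ts k)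
  else if k = j0 + 1 then
    (if 3 ≤ k then some (min (g2 ts (k - 2)) (g3 ts (k - 3)))
     else if 2 ≤ k then some (g2 ts (k - 2))
     else none)
  else if k = j0 + 2 ∧ 3 ≤ k then some (g3 ts (k - 3))
  else none

lemma relax_map (f : Nat → Option Int) (N k : Nat) (c : Int) (hk : k < N) :
    pvRelax ((List.range N).map f) (k : Int) c
      = (List.range N).map (fun i =>
          if i = k then some ((f k).elim c (fun v => min c v)) else f i) := by
  have hget : PySem.List.pyGetD ((List.range N).map f) (k : Int) none = f k := by
    rw [PySem.List.pyGetD_natCast, PySem.List.getD_map_range _ _ _ _ hk]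
  have hset : ∀ v : Option Int,
      PySem.List.pySetD ((List.range N).map f) (k : Int) v
        = (List.range N).map (fun i => if i = k then v else f i) := by
    intro v
    rw [PySem.List.pySetD_natCast]
    apply List.ext_getElem
    · simp
    · intro i h1 h2
      simp only [List.getElem_set, List.getElem_map, List.getElem_range]
      split_ifs with ha hb hc
      · rfl
      · exact absurd ha.symm hb
      · exact absurd hc.symm ha
      · rfl
  rw [pvRelax, hget]
  cases hfk : f k with
  | none =>
      dsimp only
      rw [hset]
      refine List.map_congr_left (fun i _ => ?_)
      by_cases h : i = k
      · subst h; rw [hfk, if_pos rfl, if_pos rfl]; rfl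
      · rw [if_neg h, if_neg h]
  | some v =>
      dsimp only
      split_ifs with h
      · rw [hset]
        refine List.map_congr_left (fun i _ => ?_)
        by_cases hik : i = k
        · subst hik
          rw [hfk, if_pos rfl, if_pos rfl]
          simp [min_eq_left h.le]
        · rw [if_neg hik, if_neg hik]
      · refine List.map_congr_left (fun i _ => ?_)
        by_cases hik : i = k
        · subst hik
          rw [hfk, if_pos rfl]
          simp [min_eq_right (not_lt.mp h)]
        · rw [if_neg hik]

lemma pdp_le (ts : List (Int × Int × Int)) (j0 k : Nat) (h : k ≤ j0) :
    pdp ts j0 k = some (mdp ts k) := by rw [pdp, if_pos h]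

lemma pdp_far (ts : List (Int × Int × Int)) (j0 k : Nat)
    (h1 : ¬ k ≤ j0) (h2 : k ≠ j0 + 1) (h3 : ¬ (k = j0 + 2 ∧ 3 ≤ k)) :
    pdp ts j0 k = none := by rw [pdp, if_neg h1, if_neg h2, if_neg h3]

lemma pdp_eq (ts : List (Int × Int × Int)) (j0 i : Nat) (h : i ≤ j0 ∨ j0 + 4 ≤ i) :
    pdp ts j0 i = pdp ts (j0 + 1) i := by
  rcases h with h | h
  · rw [pdp_le ts j0 i h, pdp_le ts (j0 + 1) i (by omega)]
  · rw [pdp_far ts j0 i (by omega) (by omega) (by omega),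
      pdp_far ts (j0 + 1) i (by omega) (by omega) (by omega)]

lemma upd1 (ts : List (Int × Int × Int)) (j0 : Nat) :
    some ((pdp ts j0 (j0 + 1)).elim (mdp ts j0 + (ts.getD j0 (0,0,0)).1)
      (fun v => min (mdp ts j0 + (ts.getD j0 (0,0,0)).1) v)) = pdp ts (j0 + 1) (j0 + 1) := by
  rw [pdp_le ts (j0 + 1) (j0 + 1) (le_refl _)]
  match j0 with
  | 0 =>
      rw [show pdp ts 0 (0 + 1) = none from rfl]
      simp [mdp]
  | 1 =>
      rw [show pdp ts 1 (1 + 1) = some (g2 ts 0) from rfl, mdp_two]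
      simp [Option.elim, g1, g2, min_comm]
  | (j + 2) =>
      have hp : pdp ts (j + 2) (j + 2 + 1) = some (min (g2 ts (j + 1)) (g3 ts j)) := by
        rw [pdp, if_neg (by omega), if_pos (by omega : j + 2 + 1 = j + 2 + 1),
          if_pos (by omega : 3 ≤ j + 2 + 1),
          show j + 2 + 1 - 2 = j + 1 by omega, show j + 2 + 1 - 3 = j by omega]
      rw [hp, show j + 2 + 1 = (j + 3) by omega, mdp_three ts j, min_assoc]
      simp [Option.elim, g1]

lemma upd2 (ts : List (Int × Int × Int)) (j0 : Nat) :
    some ((pdp ts j0 (j0 + 2)).elim (mdp ts j0 + (ts.getD j0 (0,0,0)).2.1)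
      (fun v => min (mdp ts j0 + (ts.getD j0 (0,0,0)).2.1) v)) = pdp ts (j0 + 1) (j0 + 2) := by
  match j0 with
  | 0 =>
      rw [show pdp ts 0 (0 + 2) = none from rfl]
      rw [pdp, if_neg (by omega), if_pos (by omega : 0 + 2 = 0 + 1 + 1)]
      rw [if_neg (by omega), if_pos (by omega : 2 ≤ 0 + 2)]
      simp [Option.elim, g2]
  | (j + 1) =>
      have hp : pdp ts (j + 1) (j + 1 + 2) = some (g3 ts j) := by
        rw [pdp, if_neg (by omega), if_neg (by omega),
          if_pos (show j + 1 + 2 = j + 1 + 2 ∧ 3 ≤ j + 1 + 2 by omega),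
          show j + 1 + 2 - 3 = j by omega]
      have hq : pdp ts (j + 1 + 1) (j + 1 + 2) = some (min (g2 ts (j + 1)) (g3 ts j)) := by
        rw [pdp, if_neg (by omega), if_pos (by omega : j + 1 + 2 = j + 1 + 1 + 1),
          if_pos (by omega : 3 ≤ j + 1 + 2),
          show j + 1 + 2 - 2 = j + 1 by omega, show j + 1 + 2 - 3 = j by omega]
      rw [hp, hq]
      simp [Option.elim, g2]

lemma upd3 (ts : List (Int × Int × Int)) (j0 : Nat) :
    some ((pdp ts j0 (j0 + 3)).elim (mdp ts j0 + (ts.getD j0 (0,0,0)).2.2)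
      (fun v => min (mdp ts j0 + (ts.getD j0 (0,0,0)).2.2) v)) = pdp ts (j0 + 1) (j0 + 3) := by
  rw [pdp_far ts j0 (j0 + 3) (by omega) (by omega) (by omega)]
  rw [pdp, if_neg (by omega), if_neg (by omega),
    if_pos (show j0 + 3 = j0 + 1 + 2 ∧ 3 ≤ j0 + 3 by omega),
    show j0 + 3 - 3 = j0 by omega]
  simp [Option.elim, g3]

lemma B_loop (ts : List (Int × Int × Int)) (m : Nat) (j0 : Nat) (hj : j0 ≤ m) :
    (PySem.List.pyRange 0 (j0 : Int) 1).foldl (fun dp j =>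
      let tj := PySem.List.pyGetD ts j (0, 0, 0)
      let dj := (PySem.List.pyGetD dp j none).getD 0
      let dp := pvRelax dp (j + 1) (dj + tj.1)
      let dp := if j + 2 ≤ (m : Int) then pvRelax dp (j + 2) (dj + tj.2.1) else dp
      if j + 3 ≤ (m : Int) then pvRelax dp (j + 3) (dj + tj.2.2) else dp)
      (some 0 :: List.replicate m none)
      = (List.range (m + 1)).map (pdp ts j0) := by
  induction j0 with
  | zero =>
      rw [PySem.List.pyRange_one_eq_nil (by omega), List.foldl_nil]
      apply List.ext_getElem
      · simp
      · intro i h1 h2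
        simp only [List.getElem_map, List.getElem_range]
        rcases Nat.eq_zero_or_pos i with hi | hi
        · subst hi; simp [pdp, mdp]
        · have : (some (0 : Int) :: List.replicate m (none : Option Int))[i] = none := by
            rcases i with _ | i
            · omega
            · simp only [List.getElem_cons_succ]
              rw [List.getElem_replicate]
          rw [this, pdp]
          split_ifs <;> first | rfl | omega
  | succ j0 ih =>
      have hj0 : j0 ≤ m := by omega
      rw [show ((j0 + 1 : Nat) : Int) = (j0 : Int) + 1 by push_cast; ring,
        PySem.List.pyRange_one_succ_right (by omega), List.foldl_append, ih hj0,
        List.foldl_cons, List.foldl_nil]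
      simp only []
      -- the source value dp[j0]
      have hdj : (PySem.List.pyGetD ((List.range (m + 1)).map (pdp ts j0)) (j0 : Int) none).getD 0
          = mdp ts j0 := by
        rw [PySem.List.pyGetD_natCast, PySem.List.getD_map_range _ _ _ _ (by omega)]
        simp [pdp]
      have htj : PySem.List.pyGetD ts (j0 : Int) (0, 0, 0) = ts.getD j0 (0, 0, 0) :=
        PySem.List.pyGetD_natCast ts j0 (0, 0, 0)
      rw [hdj, htj]
      -- first relax: dp[j0+1]
      have c1 : (j0 : Int) + 1 = ((j0 + 1 : Nat) : Int) := by push_cast; ring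
      rw [c1, relax_map (pdp ts j0) (m + 1) (j0 + 1) _ (by omega)]
      set f1 : Nat → Option Int := fun i =>
        if i = j0 + 1 then some ((pdp ts j0 (j0 + 1)).elim (mdp ts j0 + (ts.getD j0 (0,0,0)).1)
          (fun v => min (mdp ts j0 + (ts.getD j0 (0,0,0)).1) v)) else pdp ts j0 i with hf1
      by_cases h2 : j0 + 2 ≤ m
      · rw [if_pos (show (j0 : Int) + 2 ≤ (m : Int) by omega)]
        have c2 : (j0 : Int) + 2 = ((j0 + 2 : Nat) : Int) := by push_cast; ring
        rw [c2, relax_map f1 (m + 1) (j0 + 2) _ (by omega)]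
        set f2 : Nat → Option Int := fun i =>
          if i = j0 + 2 then some ((f1 (j0 + 2)).elim (mdp ts j0 + (ts.getD j0 (0,0,0)).2.1)
            (fun v => min (mdp ts j0 + (ts.getD j0 (0,0,0)).2.1) v)) else f1 i with hf2
        by_cases h3 : j0 + 3 ≤ m
        · rw [if_pos (show (j0 : Int) + 3 ≤ (m : Int) by omega)]
          have c3 : (j0 : Int) + 3 = ((j0 + 3 : Nat) : Int) := by push_cast; ring
          rw [c3, relax_map f2 (m + 1) (j0 + 3) _ (by omega)]
          refine List.map_congr_left (fun i hi => ?_)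
          rw [List.mem_range] at hi
          simp only [hf2, hf1]
          by_cases e1 : i = j0 + 1
          · subst e1
            rw [if_neg (show ¬ j0 + 1 = j0 + 3 by omega),
              if_neg (show ¬ j0 + 1 = j0 + 2 by omega), if_pos rfl]
            exact upd1 ts j0
          by_cases e2 : i = j0 + 2
          · subst e2
            rw [if_neg (show ¬ j0 + 2 = j0 + 3 by omega), if_pos rfl,
              if_neg (show ¬ j0 + 2 = j0 + 1 by omega)]
            exact upd2 ts j0
          by_cases e3 : i = j0 + 3
          · subst e3
            rw [if_pos rfl, if_neg (show ¬ j0 + 3 = j0 + 2 by omega),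
              if_neg (show ¬ j0 + 3 = j0 + 1 by omega)]
            exact upd3 ts j0
          · rw [if_neg e3, if_neg e2, if_neg e1]
            exact pdp_eq ts j0 i (by omega)
        · rw [if_neg (show ¬ (j0 : Int) + 3 ≤ (m : Int) by omega)]
          refine List.map_congr_left (fun i hi => ?_)
          rw [List.mem_range] at hi
          simp only [hf2, hf1]
          by_cases e1 : i = j0 + 1
          · subst e1
            rw [if_neg (show ¬ j0 + 1 = j0 + 2 by omega), if_pos rfl]
            exact upd1 ts j0
          by_cases e2 : i = j0 + 2
          · subst e2
            rw [if_pos rfl, if_neg (show ¬ j0 + 2 = j0 + 1 by omega)]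
            exact upd2 ts j0
          · rw [if_neg e2, if_neg e1]
            exact pdp_eq ts j0 i (by omega)
      · rw [if_neg (show ¬ (j0 : Int) + 2 ≤ (m : Int) by omega),
          if_neg (show ¬ (j0 : Int) + 3 ≤ (m : Int) by omega)]
        refine List.map_congr_left (fun i hi => ?_)
        rw [List.mem_range] at hi
        simp only [hf1]
        by_cases e1 : i = j0 + 1
        · subst e1
          rw [if_pos rfl]
          exact upd1 ts j0
        · rw [if_neg e1]
          exact pdp_eq ts j0 i (by omega)

lemma B_eq (ts : List (Int × Int × Int)) (m : Nat) :
    calk_min_time_alt (m : Int) ts = mdp ts m := by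
  rw [calk_min_time_alt]
  simp only [Int.toNat_natCast]
  rw [B_loop ts m m (le_refl m)]
  rw [PySem.List.pyGetD_natCast, PySem.List.getD_map_range _ _ _ _ (by omega)]
  simp [pdp]

-- ===== VERDICT (by name: the statement is the Claim_ definition above) =====
theorem calk_min_time_spec : Claim_equal_calk_min_time := by
  intro n ts _ hpre
  have hn : 0 ≤ n := by rcases hpre with ⟨h, _⟩ | ⟨h, _⟩ <;> omega
  obtain ⟨m, rfl⟩ : ∃ m : Nat, n = (m : Int) := ⟨n.toNat, (Int.toNat_of_nonneg hn).symm⟩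
  unfold Spec_calk_min_time
  rw [A_eq, B_eq]
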